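-- pv_equiv track=rewrite | github.com/pypi-data/pypi-mirror-177 | packages/schema-classification/schema_classification-0.1.6-py3-none-any.whl/schema_classification/dmo/mapping_remove_duplicates.py | _find_discards
-- ===== SOURCE A (Python) =====
-- def _find_discards(
--                    d_results: dict,
--                    d_idx_by_name: dict) -> dict:
--     """ Find Lowest Scored Mappings (discards)
--
--     Sample Input:
--         {   'GICS_CODE_40301040': ['GICS_CODE_40301040#2', 'GICS_CODE_40301040#3']}
--
--     d_idx_by_score:
--         {   62: 'GICS_CODE_40301040#3' }
--
--     Sample Output ('keep'):
--         [  GICS_CODE_40301040#3 ]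
--     """
--     results = set()
--
--     for name in d_idx_by_name:
--
--         # Index Duplicates by Score (map to int:str)
--         d_idx_by_score = {d_results[k]['score']: k
--                           for k in d_idx_by_name[name]}
--
--         # Highest Scored Mapping
--         max_mapping = d_idx_by_score[max(d_idx_by_score)]
--
--         # Discard all other Mappings
--         discards = [x for x in d_idx_by_name[name] if x != max_mapping]
--
--         # Add to result set
--         [results.add(x) for x in discards]
--
--     return results
-- ===== SOURCE B (Python) =====
-- def _find_discards(
--                    d_results: dict,
--                    d_idx_by_name: dict) -> dict:
--     """ Find Lowest Scored Mappings (discards)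
--
--     One pass per name: keep a running best (key, score), updating on '>='
--     so the last key with the maximal score wins, then discard the rest.
--     """
--     results = set()
--
--     for name, keys in d_idx_by_name.items():
--         best_key = keys[0]
--         best_score = d_results[best_key]['score']
--         for k in keys[1:]:
--             s = d_results[k]['score']
--             if s >= best_score:
--                 best_key, best_score = k, s
--         results.update(k for k in keys if k != best_key)
--
--     return results
-- ===== Notes on version B (the rewrite author's own statement) =====
-- stated objective: simpler
-- what changed: Per name, B replaces A's build-a-score->key-dict-then-max()-then-lookup pipeline with a single running-best fold over the key list (updating on >= so the last key with the maximal score wins, matching the dict's last-insert overwrite), then adds every non-best key to the result set.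
import Mathlib
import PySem

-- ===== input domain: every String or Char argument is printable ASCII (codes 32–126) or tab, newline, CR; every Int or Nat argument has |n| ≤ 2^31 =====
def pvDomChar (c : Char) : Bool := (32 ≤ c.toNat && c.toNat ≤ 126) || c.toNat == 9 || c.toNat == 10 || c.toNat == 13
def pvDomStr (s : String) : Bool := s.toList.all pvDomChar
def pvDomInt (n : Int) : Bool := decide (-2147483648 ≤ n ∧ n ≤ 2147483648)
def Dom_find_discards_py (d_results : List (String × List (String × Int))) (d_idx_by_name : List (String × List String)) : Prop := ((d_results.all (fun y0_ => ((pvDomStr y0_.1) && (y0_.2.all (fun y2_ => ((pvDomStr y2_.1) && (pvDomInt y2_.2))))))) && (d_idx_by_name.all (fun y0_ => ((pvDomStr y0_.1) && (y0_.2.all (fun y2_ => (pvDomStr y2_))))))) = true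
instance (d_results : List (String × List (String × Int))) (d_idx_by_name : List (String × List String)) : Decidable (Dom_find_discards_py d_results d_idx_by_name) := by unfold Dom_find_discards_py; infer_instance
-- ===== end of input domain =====

-- B replaces A's per-name score→key dict + max() + lookup with a single running-best fold;
-- return-value equivalence only (both Pythons return a fresh set, no argument mutation).

-- shared helper: the value of 'd_results[k]["score"]' (both sources contain this exact
-- subexpression); default 0 is unreachable under Pre_ (Python raises KeyError there)
def pvScore (d_results : List (String × List (String × Int))) (k : String) : Int :=
  (PySem.Dict.ofList ((PySem.Dict.ofList d_results).getD k [])).getD "score" 0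

-- ===== PORT A =====
def find_discards_py (d_results : List (String × List (String × Int))) (d_idx_by_name : List (String × List String)) : List String :=
  let din := PySem.Dict.ofList d_idx_by_name
  din.keys.foldl (fun results name =>
    let lst := din.getD name []
    -- d_idx_by_score = {d_results[k]['score']: k for k in d_idx_by_name[name]}
    let d_idx_by_score := lst.foldl (fun d k => d.insert (pvScore d_results k) k) PySem.Dict.empty
    match PySem.List.max? d_idx_by_score.keys (fun x => x) with
    | none => results            -- Python max() raises ValueError here; excluded by Pre_
    | some m =>
      let max_mapping := d_idx_by_score.getD m ""
      let discards := lst.filter (fun x => x != max_mapping)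
      discards.foldl PySem.Set.add results) PySem.Set.empty

-- ===== PORT B =====
def find_discards_py_alt (d_results : List (String × List (String × Int))) (d_idx_by_name : List (String × List String)) : List String :=
  (PySem.Dict.ofList d_idx_by_name).items.foldl (fun results p =>
    match p.2 with
    | [] => results              -- Python B raises IndexError (keys[0]) here; excluded by Pre_
    | k0 :: rest =>
      let best := rest.foldl (fun b k =>
        let s := pvScore d_results k
        if s ≥ b.2 then (k, s) else b) (k0, pvScore d_results k0)
      PySem.Set.update results (p.2.filter (fun k => k != best.1))) PySem.Set.empty

-- ===== PRECONDITION & SPEC =====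
-- Pre_ excludes exactly the inputs where Python A raises: a name whose key list is empty
-- (ValueError from max() on an empty dict) or contains a key k with no d_results[k]['score']
-- (KeyError).
def Pre_find_discards_py (d_results : List (String × List (String × Int))) (d_idx_by_name : List (String × List String)) : Prop :=
  ((PySem.Dict.ofList d_idx_by_name).items.all (fun p =>
    !p.2.isEmpty && p.2.all (fun k =>
      match (PySem.Dict.ofList d_results).get? k with
      | none => false
      | some l => (PySem.Dict.ofList l).contains "score"))) = true
instance (d_results : List (String × List (String × Int))) (d_idx_by_name : List (String × List String)) : Decidable (Pre_find_discards_py d_results d_idx_by_name) := by unfold Pre_find_discards_py; infer_instance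

def pvWitness_find_discards_py : (List (String × List (String × Int))) × (List (String × List String)) :=
  ([("A#1", [("score", 1)]), ("A#2", [("score", 2)])], [("A", ["A#1", "A#2"])])

def Spec_find_discards_py (d_results : List (String × List (String × Int))) (d_idx_by_name : List (String × List String)) (out : List String) : Prop := out = find_discards_py_alt d_results d_idx_by_name
instance (d_results : List (String × List (String × Int))) (d_idx_by_name : List (String × List String)) (out : List String) : Decidable (Spec_find_discards_py d_results d_idx_by_name out) := by unfold Spec_find_discards_py; infer_instance

-- ===== CLAIM (what is proved, stated in full; the proofs are below) =====
def Claim_equal_find_discards_py : Prop := ∀ (d_results : List (String × List (String × Int))) (d_idx_by_name : List (String × List String)), Dom_find_discards_py d_results d_idx_by_name → Pre_find_discards_py d_results d_idx_by_name → Spec_find_discards_py d_results d_idx_by_name (find_discards_py d_results d_idx_by_name)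

-- ===== LEMMAS AND PROOFS =====

-- Invariant carried through a per-name key list: the B-side running best (bk, bs) names the
-- maximal key of the A-side score→key dict, and the dict maps it to bk.
lemma pv_inv_fold (s : String → Int) (lst : List String) :
    ∀ (d : PySem.Dict Int String) (bk : String) (bs : Int),
      bs ∈ d.keys → (∀ y ∈ d.keys, y ≤ bs) → d.getD bs "" = bk →
      (lst.foldl (fun b k => if s k ≥ b.2 then (k, s k) else b) (bk, bs)).2
          ∈ (lst.foldl (fun d k => d.insert (s k) k) d).keys
      ∧ (∀ y ∈ (lst.foldl (fun d k => d.insert (s k) k) d).keys,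
            y ≤ (lst.foldl (fun b k => if s k ≥ b.2 then (k, s k) else b) (bk, bs)).2)
      ∧ (lst.foldl (fun d k => d.insert (s k) k) d).getD
            ((lst.foldl (fun b k => if s k ≥ b.2 then (k, s k) else b) (bk, bs)).2) ""
          = (lst.foldl (fun b k => if s k ≥ b.2 then (k, s k) else b) (bk, bs)).1 := by
  induction lst with
  | nil => intro d bk bs h1 h2 h3; exact ⟨h1, h2, h3⟩
  | cons k t ih =>
    intro d bk bs h1 h2 h3
    simp only [List.foldl_cons]
    by_cases hge : s k ≥ bs
    · rw [if_pos hge]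
      refine ih _ k (s k) ?_ ?_ ?_
      · exact (PySem.Dict.mem_keys_insert _ _ _ _).2 (Or.inl rfl)
      · intro y hy
        rcases (PySem.Dict.mem_keys_insert _ _ _ _).1 hy with h | h
        · omega
        · exact le_trans (h2 y h) hge
      · rw [PySem.Dict.getD_insert]; simp
    · rw [if_neg hge]
      refine ih _ bk bs ?_ ?_ ?_
      · exact (PySem.Dict.mem_keys_insert _ _ _ _).2 (Or.inr h1)
      · intro y hy
        rcases (PySem.Dict.mem_keys_insert _ _ _ _).1 hy with h | h
        · omega
        · exact h2 y h
      · rw [PySem.Dict.getD_insert, if_neg (by omega)]; exact h3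

-- Per-name bodies agree (for every key list, including the empty one both ports skip).
lemma pv_body_eq (d_results : List (String × List (String × Int)))
    (results : List String) (lst : List String) :
    (match PySem.List.max?
        ((lst.foldl (fun (d : PySem.Dict Int String) k => d.insert (pvScore d_results k) k) PySem.Dict.empty).keys)
        (fun x => x) with
     | none => results
     | some m =>
       (lst.filter (fun x => x !=
          (lst.foldl (fun (d : PySem.Dict Int String) k => d.insert (pvScore d_results k) k) PySem.Dict.empty).getD m "")).foldl
          PySem.Set.add results)
    = (match lst with
       | [] => results
       | k0 :: rest =>
         PySem.Set.update results (lst.filter (fun k => k !=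
           (rest.foldl (fun (b : String × Int) k =>
              if pvScore d_results k ≥ b.2 then (k, pvScore d_results k) else b)
              (k0, pvScore d_results k0)).1))) := by
  cases lst with
  | nil => rfl
  | cons k0 rest =>
    have h0 : ((PySem.Dict.empty : PySem.Dict Int String).insert (pvScore d_results k0) k0).keys
        = [pvScore d_results k0] := rfl
    obtain ⟨h1, h2, h3⟩ := pv_inv_fold (pvScore d_results) rest
      ((PySem.Dict.empty : PySem.Dict Int String).insert (pvScore d_results k0) k0)
      k0 (pvScore d_results k0)
      (by rw [h0]; exact List.mem_singleton.2 rfl)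
      (by rw [h0]; intro y hy; rw [List.mem_singleton] at hy; omega)
      (by rw [PySem.Dict.getD_insert]; simp)
    simp only [List.foldl_cons]
    have hne : (rest.foldl (fun (d : PySem.Dict Int String) k => d.insert (pvScore d_results k) k)
        ((PySem.Dict.empty : PySem.Dict Int String).insert (pvScore d_results k0) k0)).keys ≠ [] :=
      fun h => by rw [h] at h1; exact absurd h1 (List.not_mem_nil)
    obtain ⟨m, hm⟩ : ∃ m, PySem.List.max?
        (rest.foldl (fun (d : PySem.Dict Int String) k => d.insert (pvScore d_results k) k)
          ((PySem.Dict.empty : PySem.Dict Int String).insert (pvScore d_results k0) k0)).keys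
        (fun x => x) = some m := by
      cases hmax : PySem.List.max?
          (rest.foldl (fun (d : PySem.Dict Int String) k => d.insert (pvScore d_results k) k)
            ((PySem.Dict.empty : PySem.Dict Int String).insert (pvScore d_results k0) k0)).keys
          (fun x => x) with
      | none => exact absurd ((PySem.List.max?_eq_none_iff _ _).1 hmax) hne
      | some m => exact ⟨m, rfl⟩
    have hmem := PySem.List.max?_mem hm
    have hmax := PySem.List.max?_isMax hm
    have hmb : m = (rest.foldl (fun (b : String × Int) k =>
        if pvScore d_results k ≥ b.2 then (k, pvScore d_results k) else b)
        (k0, pvScore d_results k0)).2 := le_antisymm (h2 m hmem) (hmax _ h1)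
    rw [hm, hmb]
    simp only [h3, PySem.Set.update]

-- ===== VERDICT (by name: the statement is the Claim_ definition above) =====
theorem find_discards_py_spec : Claim_equal_find_discards_py := by
  intro d_results d_idx_by_name _ _
  unfold Spec_find_discards_py find_discards_py find_discards_py_alt
  rw [PySem.Dict.items_eq_map_keys (PySem.Dict.ofList d_idx_by_name)
        (PySem.Dict.nodup_keys_ofList d_idx_by_name) ([] : List String),
      List.foldl_map]
  refine PySem.List.foldl_congr_mem _ _ _ _ (fun results name _ => ?_)
  exact pv_body_eq d_results results _
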